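-- pv_equiv track=rewrite | github.com/dmehrotra/uber-ocr | ocr/parse_uber.py | try_order_e1
-- ===== SOURCE A (Python) =====
-- def try_order_e1(content):
-- 	line_index = None
-- 	for l in content:
-- 		if line_index == None:
-- 			if "your earnings" in l and "calculated" not in l:
-- 				line_index = content.index(l)
-- 		else:
-- 			if "$" in l:
-- 				return l.strip()
-- ===== SOURCE B (Python) =====
-- def try_order_e1(content):
--     # index table: rows containing a dollar amount, built once
--     dollar_rows = [i for i, l in enumerate(content) if "$" in l]
--     earn = next((i for i, l in enumerate(content)
--                  if "your earnings" in l and "calculated" not in l), None)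
--     if earn is None:
--         return None
--     j = next((j for j in dollar_rows if j > earn), None)
--     return content[j].strip() if j is not None else None
-- ===== Notes on version B (the rewrite author's own statement) =====
-- stated objective: alternative
-- what changed: Replaces A's single stateful pass (Optional line_index flag plus a redundant content.index call) by an index-table approach: build the list of dollar-row indices once, find the earnings line's index, then select the first dollar index strictly past it and index back into content.
import Mathlib
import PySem

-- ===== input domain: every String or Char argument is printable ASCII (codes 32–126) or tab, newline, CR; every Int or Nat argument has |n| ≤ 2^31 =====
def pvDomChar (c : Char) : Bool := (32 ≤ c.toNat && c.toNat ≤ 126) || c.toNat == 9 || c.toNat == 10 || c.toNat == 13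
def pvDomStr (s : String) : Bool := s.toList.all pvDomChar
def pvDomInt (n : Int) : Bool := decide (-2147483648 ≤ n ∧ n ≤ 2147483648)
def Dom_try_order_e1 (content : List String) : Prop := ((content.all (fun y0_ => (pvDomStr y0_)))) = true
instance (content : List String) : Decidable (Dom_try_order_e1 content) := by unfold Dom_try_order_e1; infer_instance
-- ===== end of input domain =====

-- B replaces A's single stateful pass (Optional flag plus a redundant content.index call) by an
-- index-table approach: build the list of dollar-row indices once, find the earnings line's
-- index, then pick the first dollar index past it and index back into content.

-- ===== PORT A =====
-- A's loop: state line_index (None ↔ still searching); the index value itself is never read.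
-- 'line_index = content.index(l)' is exact here: l is drawn from content, so index? never fails.
def pvLoopA (content : List String) (li : Option Int) : List String → Option String
  | [] => none
  | l :: rest =>
    if li = none then
      if PySem.Str.isIn "your earnings" l && !(PySem.Str.isIn "calculated" l) then
        pvLoopA content ((PySem.List.index? content l).map (Int.ofNat)) rest
      else
        pvLoopA content li rest
    else
      if PySem.Str.isIn "$" l then some (PySem.Str.strip l)
      else pvLoopA content li rest

def try_order_e1 (content : List String) : Option String :=
  pvLoopA content none content

-- ===== PORT B =====
-- Source B line 1: dollar_rows = [i for i, l in enumerate(content) if "$" in l]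
def pvDollarRows (content : List String) : List Int :=
  (PySem.List.enumerate content).filterMap
    (fun p => if PySem.Str.isIn "$" p.2 then some p.1 else none)

-- Source B: earn = next((i for i, l in enumerate(content) if … ), None)
def pvEarn : List (Int × String) → Option Int
  | [] => none
  | (i, l) :: t =>
    if PySem.Str.isIn "your earnings" l && !(PySem.Str.isIn "calculated" l) then some i
    else pvEarn t

-- Source B: j = next((j for j in dollar_rows if j > earn), None)
def pvFirstAfter (i : Int) : List Int → Option Int
  | [] => none
  | j :: t => if i < j then some j else pvFirstAfter i t

def try_order_e1_alt (content : List String) : Option String :=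
  let dollar_rows := pvDollarRows content
  match pvEarn (PySem.List.enumerate content) with
  | none => none
  | some earn =>
    match pvFirstAfter earn dollar_rows with
    | none => none
    | some j => (PySem.List.pyGet? content j).map PySem.Str.strip

-- ===== PRECONDITION & SPEC =====
def Spec_try_order_e1 (content : List String) (out : Option String) : Prop := out = try_order_e1_alt content
instance (content : List String) (out : Option String) : Decidable (Spec_try_order_e1 content out) := by unfold Spec_try_order_e1; infer_instance

-- ===== CLAIM (what is proved, stated in full; the proofs are below) =====
def Claim_equal_try_order_e1 : Prop := ∀ (content : List String), Dom_try_order_e1 content → Spec_try_order_e1 content (try_order_e1 content)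

-- ===== LEMMAS AND PROOFS =====

-- first stripped dollar line of a suffix (proof-side characterisation shared by both sides)
def pvScanB : List String → Option String
  | [] => none
  | l :: rest => if PySem.Str.isIn "$" l then some (PySem.Str.strip l) else pvScanB rest

-- once line_index is set, A's loop returns the first stripped dollar line of the rest
lemma pvLoopA_some (c : List String) (k : Int) :
    ∀ rest : List String, pvLoopA c (some k) rest = pvScanB rest := by
  intro rest
  induction rest with
  | nil => rfl
  | cons l t ih => simp [pvLoopA, pvScanB, ih]

-- B's pick over the dollar-row table of a suffix equals the dollar scan of the right suffix
lemma pvPick_eq_scan (c : List String) :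
    ∀ m n : Nat, c.length - n ≤ m → ∀ i : Nat,
      (match pvFirstAfter (i : Int)
          ((PySem.List.enumerate (c.drop n) (n : Int)).filterMap
            (fun p => if PySem.Str.isIn "$" p.2 then some p.1 else none)) with
        | none => none
        | some j => (PySem.List.pyGet? c j).map PySem.Str.strip)
      = pvScanB (c.drop (max n (i + 1))) := by
  intro m
  induction m with
  | zero =>
    intro n hn i
    have h : c.drop n = [] := List.drop_eq_nil_of_le (by omega)
    have h2 : c.drop (max n (i + 1)) = [] := List.drop_eq_nil_of_le (by omega)
    simp [h, h2, pvFirstAfter, pvScanB]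
  | succ m ih =>
    intro n hn i
    cases hd : c.drop n with
    | nil =>
      have h2 : c.drop (max n (i + 1)) = [] := by
        apply List.drop_eq_nil_of_le
        have : c.length ≤ n := by
          by_contra hlt
          have : c.drop n ≠ [] := by simp [List.drop_eq_nil_iff]; omega
          exact this hd
        omega
      simp [h2, pvFirstAfter, pvScanB]
    | cons l rest =>
      have hrest : c.drop (n + 1) = rest := by
        have h2 := List.drop_drop (l := c) (i := 1) (j := n)
        rw [← h2, hd, List.drop_one]; rfl
      have hlen : n < c.length := by
        by_contra hlt
        have : c.drop n = [] := List.drop_eq_nil_of_le (by omega)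
        simp [this] at hd
      have hcn : getElem? c n = some l := by
        rw [← List.head?_drop, hd]; rfl
      have hcast : (n : Int) + 1 = ((n + 1 : Nat) : Int) := by push_cast; ring
      rw [PySem.List.enumerate_cons]
      by_cases hdol : (PySem.Str.isIn "$" l) = true
      · simp only [List.filterMap_cons, hdol, if_pos]
        by_cases hin : i < n
        · have hlt : (i : Int) < (n : Int) := by exact_mod_cast hin
          have hmax : max n (i + 1) = n := by omega
          rw [pvFirstAfter, if_pos hlt]
          have hdol' : PySem.Chars.isIn ['$'] l.toList = true := by
            simpa [PySem.Str.isIn] using hdol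
          simp [hmax, hd, pvScanB, hdol', hcn]
        · have hnlt : ¬ ((i : Int) < (n : Int)) := by
            intro h; exact hin (by exact_mod_cast h)
          rw [pvFirstAfter, if_neg hnlt]
          have := ih (n + 1) (by omega) i
          rw [hrest] at this
          rw [hcast, this]
          have : max (n + 1) (i + 1) = i + 1 := by omega
          rw [this]
          have : max n (i + 1) = i + 1 := by omega
          rw [this]
      · simp only [List.filterMap_cons, hdol, if_neg, Bool.false_eq_true, not_false_iff]
        have := ih (n + 1) (by omega) i
        rw [hrest] at this
        rw [hcast, this]
        by_cases hin : i < n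
        · have h1 : max (n + 1) (i + 1) = n + 1 := by omega
          have h2 : max n (i + 1) = n := by omega
          rw [h1, h2, hd]
          have hdol' : PySem.Chars.isIn ['$'] l.toList = false := by
            simpa [PySem.Str.isIn] using hdol
          simp [pvScanB, hdol', hrest]
        · have h1 : max (n + 1) (i + 1) = max n (i + 1) ∨
              (i = n ∧ max (n + 1) (i + 1) = n + 1 ∧ max n (i + 1) = n + 1) := by omega
          rcases h1 with h1 | ⟨_, h2, h3⟩
          · rw [h1]
          · rw [h2, h3]

-- main invariant: A's searching phase on a suffix equals B's pipeline started there
lemma pvLoopA_none (c : List String) :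
    ∀ m n : Nat, c.length - n ≤ m →
      pvLoopA c none (c.drop n)
        = (match pvEarn (PySem.List.enumerate (c.drop n) (n : Int)) with
          | none => none
          | some earn =>
            match pvFirstAfter earn (pvDollarRows c) with
            | none => none
            | some j => (PySem.List.pyGet? c j).map PySem.Str.strip) := by
  intro m
  induction m with
  | zero =>
    intro n hn
    have h : c.drop n = [] := List.drop_eq_nil_of_le (by omega)
    simp [h, pvLoopA, pvEarn]
  | succ m ih =>
    intro n hn
    cases hd : c.drop n with
    | nil => simp [pvLoopA, PySem.List.enumerate, pvEarn]
    | cons l rest =>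
      have hrest : c.drop (n + 1) = rest := by
        have h2 := List.drop_drop (l := c) (i := 1) (j := n)
        rw [← h2, hd, List.drop_one]; rfl
      have hcast : (n : Int) + 1 = ((n + 1 : Nat) : Int) := by push_cast; ring
      rw [PySem.List.enumerate_cons]
      by_cases he : (PySem.Str.isIn "your earnings" l && !(PySem.Str.isIn "calculated" l)) = true
      · -- earnings line found at index n
        have hmem : l ∈ c := by
          have hl : l ∈ c.drop n := by rw [hd]; exact List.mem_cons_self
          exact List.mem_of_mem_drop hl
        obtain ⟨k, hk⟩ := Option.isSome_iff_exists.mp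
          ((PySem.List.index?_isSome_iff (xs := c) (v := l)).mpr hmem)
        rw [pvLoopA, if_pos rfl, if_pos he, hk]
        simp only [Option.map_some]
        rw [pvLoopA_some c (Int.ofNat k) rest]
        simp only [pvEarn]
        rw [if_pos he]
        have hb := pvPick_eq_scan c c.length 0 (by omega) n
        simp only [List.drop_zero, Nat.cast_zero, Nat.zero_max] at hb
        rw [← hrest]
        exact hb.symm
      · rw [pvLoopA, if_pos rfl, if_neg he, pvEarn, if_neg he, hcast, ← hrest]
        exact ih (n + 1) (by omega)

-- ===== VERDICT (by name: the statement is the Claim_ definition above) =====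
theorem try_order_e1_spec : Claim_equal_try_order_e1 := by
  intro content _
  unfold Spec_try_order_e1 try_order_e1 try_order_e1_alt
  have h := pvLoopA_none content content.length 0 (by omega)
  simp only [List.drop_zero, Nat.cast_zero] at h
  exact h
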